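-- pv_equiv track=rewrite | github.com/biplobmahadi/dsa-revisit | algoExpert/array/bestSeat.py | bestSeat
-- ===== SOURCE A (Python) =====
-- def bestSeat(seats):
--     if len(seats) < 3: return -1
--     res, gap = -1, 0
--     i = 1
--     while i < len(seats)-1:
--         if seats[i]:
--             i+= 1
--             continue
--         l = r = i
--         while r < len(seats)-1 and seats[r] == 0:
--             r+=1
--         if r-l > gap:
--             gap = r-l
--             res = l + ((r-l-1)//2)
--         i = r+1
--     return res
-- ===== SOURCE B (Python) =====
-- def bestSeat(seats):
--     n = len(seats)
--     if n < 3: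
--         return -1
--     walls = [0] + [i for i in range(1, n - 1) if seats[i] != 0] + [n - 1]
--     res, gap = -1, 0
--     for a, b in zip(walls, walls[1:]):
--         if b - a - 1 > gap:
--             gap = b - a - 1
--             res = (a + b) // 2
--     return res
-- ===== Notes on version B (the rewrite author's own statement) =====
-- stated objective: simpler
-- what changed: Replaces A's inline scan-and-jump while loop (with an inner run-finding loop) by precomputing the list of wall positions (virtual walls at 0 and n-1 plus occupied seats) and a single pairwise sweep over consecutive walls computing gap b-a-1 and midpoint (a+b)//2.
import Mathlib
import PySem

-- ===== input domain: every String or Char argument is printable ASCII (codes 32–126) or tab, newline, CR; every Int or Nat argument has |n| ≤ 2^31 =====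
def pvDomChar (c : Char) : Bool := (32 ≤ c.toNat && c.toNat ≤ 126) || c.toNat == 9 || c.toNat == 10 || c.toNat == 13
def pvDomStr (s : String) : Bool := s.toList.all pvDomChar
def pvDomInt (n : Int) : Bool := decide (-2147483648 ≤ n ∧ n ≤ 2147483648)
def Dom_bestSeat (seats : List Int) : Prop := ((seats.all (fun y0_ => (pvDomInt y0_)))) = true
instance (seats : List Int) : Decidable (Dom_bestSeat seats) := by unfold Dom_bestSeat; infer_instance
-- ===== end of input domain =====

-- B is a simpler decomposition of the same O(n) task: precompute wall positions, then one pairwise sweep.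

-- ===== PORT A =====
-- inner 'while r < len(seats)-1 and seats[r] == 0: r += 1'
def aRun (seats : List Int) (r : Nat) : Nat :=
  if h : r < seats.length - 1 ∧ seats.getD r 0 = 0 then aRun seats (r + 1) else r
termination_by seats.length - r
decreasing_by exact Nat.sub_succ_lt_self seats.length r (Nat.lt_of_lt_of_le h.1 (Nat.sub_le _ _))

theorem aRun_ge (seats : List Int) (r : Nat) : r ≤ aRun seats r := by
  fun_induction aRun seats r with
  | case1 r h ih => omega
  | case2 r h => omega

-- outer while loop; state (i, res, gap)
def aLoop (seats : List Int) (i : Nat) (res gap : Int) : Int :=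
  if h : i < seats.length - 1 then
    if seats.getD i 0 ≠ 0 then aLoop seats (i + 1) res gap
    else
      if ((aRun seats i : Int) - (i : Int)) > gap then
        aLoop seats (aRun seats i + 1)
          ((i : Int) + PySem.Int.floordiv ((aRun seats i : Int) - (i : Int) - 1) 2)
          ((aRun seats i : Int) - (i : Int))
      else aLoop seats (aRun seats i + 1) res gap
  else res
termination_by seats.length - i
decreasing_by
  · exact Nat.sub_succ_lt_self seats.length i (Nat.lt_of_lt_of_le h (Nat.sub_le _ _))
  · exact Nat.sub_lt_sub_left (Nat.lt_of_lt_of_le h (Nat.sub_le _ _))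
      (Nat.lt_succ_of_le (aRun_ge seats i))
  · exact Nat.sub_lt_sub_left (Nat.lt_of_lt_of_le h (Nat.sub_le _ _))
      (Nat.lt_succ_of_le (aRun_ge seats i))

def bestSeat (seats : List Int) : Int :=
  if seats.length < 3 then -1 else aLoop seats 1 (-1) 0

-- ===== PORT B =====
-- walls = [0] + [i for i in range(1, n-1) if seats[i] != 0] + [n-1]
def bWalls (seats : List Int) : List Int :=
  ((0 : Int) :: (PySem.List.pyRange 1 ((seats.length : Int) - 1) 1).filter
      (fun i => seats.getD i.toNat 0 ≠ 0)) ++ [(seats.length : Int) - 1]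

-- for a, b in zip(walls, walls[1:]): …
def bSweep (pairs : List (Int × Int)) (res gap : Int) : Int :=
  match pairs with
  | [] => res
  | (a, b) :: rest =>
      if b - a - 1 > gap then bSweep rest (PySem.Int.floordiv (a + b) 2) (b - a - 1)
      else bSweep rest res gap

def bestSeat_alt (seats : List Int) : Int :=
  if seats.length < 3 then -1
  else bSweep ((bWalls seats).zip (bWalls seats).tail) (-1) 0

-- ===== PRECONDITION & SPEC =====
def Spec_bestSeat (seats : List Int) (out : Int) : Prop := out = bestSeat_alt seats
instance (seats : List Int) (out : Int) : Decidable (Spec_bestSeat seats out) := by unfold Spec_bestSeat; infer_instance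

-- ===== CLAIM (what is proved, stated in full; the proofs are below) =====
def Claim_equal_bestSeat : Prop := ∀ (seats : List Int), Dom_bestSeat seats → Spec_bestSeat seats (bestSeat seats)

-- ===== LEMMAS AND PROOFS =====

-- sweep over the wall list itself, carrying the previous wall
def sweepW (seats : List Int) (a : Int) (ws : List Int) (res gap : Int) : Int :=
  match ws with
  | [] => res
  | b :: rest =>
      if b - a - 1 > gap then sweepW seats b rest (PySem.Int.floordiv (a + b) 2) (b - a - 1)
      else sweepW seats b rest res gap

theorem bSweep_zip (seats : List Int) (a : Int) (ws : List Int) (res gap : Int) :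
    bSweep ((a :: ws).zip ws) res gap = sweepW seats a ws res gap := by
  induction ws generalizing a res gap with
  | nil => simp [bSweep, sweepW]
  | cons b rest ih =>
      simp only [List.zip_cons_cons, bSweep, sweepW]
      split <;> exact ih ..

-- walls at positions ≥ i (occupied seats in [i, n-2]) plus the virtual end wall n-1
def wallsFrom (seats : List Int) (i : Nat) : List Int :=
  ((List.range' i (seats.length - 1 - i)).filter (fun j => seats.getD j 0 ≠ 0)).map
      (fun j : Nat => (j : Int)) ++ [(seats.length : Int) - 1]

theorem wallsFrom_stop (seats : List Int) (i : Nat) (h : seats.length - 1 ≤ i) :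
    wallsFrom seats i = [(seats.length : Int) - 1] := by
  unfold wallsFrom
  have : seats.length - 1 - i = 0 := by omega
  simp [this]

theorem wallsFrom_cons (seats : List Int) (i : Nat) (h : i < seats.length - 1)
    (hz : seats.getD i 0 ≠ 0) :
    wallsFrom seats i = (i : Int) :: wallsFrom seats (i + 1) := by
  unfold wallsFrom
  rw [show seats.length - 1 - i = (seats.length - 1 - (i + 1)) + 1 by omega,
      List.range'_succ]
  simp only [List.getD] at hz
  simp [hz]

theorem wallsFrom_skip (seats : List Int) (i : Nat) (h : i < seats.length - 1)
    (hz : seats.getD i 0 = 0) :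
    wallsFrom seats i = wallsFrom seats (i + 1) := by
  unfold wallsFrom
  rw [show seats.length - 1 - i = (seats.length - 1 - (i + 1)) + 1 by omega,
      List.range'_succ]
  simp only [List.getD] at hz
  simp [hz]

-- characterization of the inner run loop
theorem aRun_spec (seats : List Int) (i : Nat) :
    (aRun seats i ≤ seats.length - 1 ∨ aRun seats i = i) ∧
      (¬ (aRun seats i < seats.length - 1 ∧ seats.getD (aRun seats i) 0 = 0)) ∧
      (∀ j, i ≤ j → j < aRun seats i → seats.getD j 0 = 0) := by
  fun_induction aRun seats i with
  | case1 r h ih =>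
      refine ⟨by omega, ih.2.1, ?_⟩
      intro j hj1 hj2
      rcases Nat.eq_or_lt_of_le hj1 with rfl | hlt
      · exact h.2
      · exact ih.2.2 j hlt hj2
  | case2 r h => exact ⟨Or.inr rfl, h, by omega⟩

theorem wallsFrom_run (seats : List Int) (i j : Nat) (hij : i ≤ j)
    (hj : j ≤ seats.length - 1) (hz : ∀ k, i ≤ k → k < j → seats.getD k 0 = 0) :
    wallsFrom seats i = wallsFrom seats j := by
  induction j with
  | zero =>
      have : i = 0 := by omega
      simp [this]
  | succ m ih =>
      rcases Nat.eq_or_lt_of_le hij with rfl | hlt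
      · rfl
      · have h1 : wallsFrom seats i = wallsFrom seats m :=
          ih (by omega) (by omega) (fun k hk1 hk2 => hz k hk1 (by omega))
        rw [h1, wallsFrom_skip seats m (by omega) (hz m (by omega) (by omega))]

-- main loop invariant: A's loop from i equals the wall sweep with previous wall i-1
theorem loop_eq (seats : List Int) (i : Nat) (res gap : Int) (hi : 1 ≤ i) (hg : 0 ≤ gap) :
    aLoop seats i res gap = sweepW seats ((i : Int) - 1) (wallsFrom seats i) res gap := by
  fun_induction aLoop seats i res gap with
  | case1 i res gap h hnz ih =>
      -- occupied seat: it is a wall at distance 1, gap 0, never triggers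
      rw [wallsFrom_cons seats i h hnz]
      simp only [sweepW]
      rw [if_neg (by omega)]
      rw [ih (by omega) hg]
      congr 1
      push_cast; ring
  | case2 i res gap h hz hgt ih =>
      -- zero run [i, r): one triggering pair (i-1, r)
      simp only [not_not] at hz
      set r := aRun seats i with hr
      obtain ⟨hb, hstop, hzs⟩ := aRun_spec seats i
      have hge : i ≤ r := aRun_ge seats i
      have hrn : r ≤ seats.length - 1 := by omega
      have hw : wallsFrom seats i = wallsFrom seats r := wallsFrom_run seats i r hge hrn hzs
      have hri : i < r := by
        rcases Nat.eq_or_lt_of_le hge with heq | h'; · exfalso; exact hstop ⟨by omega, by rw [← hr, ← heq]; exact hz⟩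
        · exact h'
      by_cases hend : r < seats.length - 1
      · -- r is an occupied seat wall
        have hrz : seats.getD r 0 ≠ 0 := fun hc => hstop ⟨hend, hc⟩
        rw [hw, wallsFrom_cons seats r hend hrz]
        simp only [sweepW]
        rw [if_pos (by omega)]
        rw [ih (by omega) (by omega)]
        rw [show ((r + 1 : Nat) : Int) - 1 = (r : Int) by omega]
        congr 1
        · -- i + (r-i-1)//2 = ((i-1)+r)//2
          rw [PySem.Int.floordiv_eq_ediv_of_pos (by omega), PySem.Int.floordiv_eq_ediv_of_pos (by omega)]
          omega
        · omega
      · -- r = n-1: the final virtual wall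
        have hr1 : r = seats.length - 1 := by omega
        rw [hw, wallsFrom_stop seats r (by omega)]
        have hcast : ((seats.length : Int) - 1) = (r : Int) := by
          have : 1 ≤ seats.length := by omega
          omega
        simp only [sweepW, hcast]
        rw [if_pos (by omega)]
        rw [ih (by omega) (by omega)]
        rw [wallsFrom_stop seats (r + 1) (by omega), hcast]
        simp only [sweepW]
        rw [if_neg (by omega)]
        rw [PySem.Int.floordiv_eq_ediv_of_pos (by omega), PySem.Int.floordiv_eq_ediv_of_pos (by omega)]
        omega
  | case3 i res gap h hz hle ih =>
      simp only [not_not] at hz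
      set r := aRun seats i with hr
      obtain ⟨hb, hstop, hzs⟩ := aRun_spec seats i
      have hge : i ≤ r := aRun_ge seats i
      have hrn : r ≤ seats.length - 1 := by omega
      have hw : wallsFrom seats i = wallsFrom seats r := wallsFrom_run seats i r hge hrn hzs
      by_cases hend : r < seats.length - 1
      · have hrz : seats.getD r 0 ≠ 0 := fun hc => hstop ⟨hend, hc⟩
        rw [hw, wallsFrom_cons seats r hend hrz]
        simp only [sweepW]
        rw [if_neg (by omega)]
        rw [ih (by omega) hg]
        congr 1
        push_cast; ring
      · have hr1 : r = seats.length - 1 := by omega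
        rw [hw, wallsFrom_stop seats r (by omega)]
        have hcast : ((seats.length : Int) - 1) = (r : Int) := by
          have : 1 ≤ seats.length := by omega
          omega
        simp only [sweepW, hcast]
        rw [if_neg (by omega)]
        rw [ih (by omega) hg]
        rw [wallsFrom_stop seats (r + 1) (by omega), hcast]
        simp only [sweepW]
        rw [if_neg (by omega)]
  | case4 i res gap h =>
      rw [wallsFrom_stop seats i (by omega)]
      simp only [sweepW]
      rw [if_neg (by omega)]

-- B's wall list is 0 :: wallsFrom 1
theorem bWalls_eq (seats : List Int) (h : 3 ≤ seats.length) :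
    bWalls seats = (0 : Int) :: wallsFrom seats 1 := by
  unfold bWalls wallsFrom
  rw [PySem.List.pyRange_one]
  have hlen : (((seats.length : Int) - 1) - 1).toNat = seats.length - 1 - 1 := by omega
  rw [hlen, List.range'_eq_map_range, List.filter_map, List.filter_map, List.map_map]
  have hp : ∀ x ∈ List.range (seats.length - 1 - 1),
      ((fun i : Int => decide (seats.getD i.toNat 0 ≠ 0)) ∘ (fun k : Nat => (1 : Int) + k)) x
        = ((fun j : Nat => decide (seats.getD j 0 ≠ 0)) ∘ (fun k : Nat => 1 + k)) x := by
    intro k _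
    simp [show ((1 : Int) + k).toNat = 1 + k by omega]
  simp only [List.cons_append]
  rw [List.filter_congr hp]
  have hf : ∀ x ∈ List.filter ((fun j : Nat => decide (seats.getD j 0 ≠ 0)) ∘ (fun k : Nat => 1 + k))
      (List.range (seats.length - 1 - 1)),
      (fun k : Nat => (1 : Int) + k) x = ((fun j : Nat => (j : Int)) ∘ (fun x : Nat => 1 + x)) x := by
    intro k _
    simp
  rw [List.map_congr_left hf]

-- ===== VERDICT (by name: the statement is the Claim_ definition above) =====
theorem bestSeat_spec : Claim_equal_bestSeat := by
  intro seats _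
  unfold Spec_bestSeat bestSeat bestSeat_alt
  by_cases h : seats.length < 3
  · simp [h]
  · rw [if_neg h, if_neg h]
    rw [bWalls_eq seats (by omega)]
    rw [List.tail_cons, bSweep_zip seats]
    rw [loop_eq seats 1 (-1) 0 (by omega) (by omega)]
    norm_num
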